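-- pv_equiv track=rewrite | github.com/chiralcentre/Kattis | textureanalysis.py | solve
-- ===== SOURCE A (Python) =====
-- def solve(s1):
--     #sep = -1 means that the number of separating white pixels for first pair of black pixels has not been calculated yet
--     sep,count = -1,0
--     #start from second pixel, since first pixel is always black
--     for i in range(1,len(s1)):
--         if s1[i] == ".":
--             count += 1
--         else:
--             if sep == -1 or count == sep:
--                 sep = count
--                 count = 0 #reset count
--             else:
--                 return "NOT EVEN"
--     return "EVEN"
-- ===== SOURCE B (Python) =====
-- def solve(s1):
--     # black-pixel positions; position 0 is implicitly black
--     pos = [0]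
--     for i in range(1, len(s1)):
--         if s1[i] != '.':
--             pos.append(i)
--     diffs = [b - a for a, b in zip(pos, pos[1:])]
--     return "EVEN" if all(d == diffs[0] for d in diffs) else "NOT EVEN"
-- ===== Notes on version B (the rewrite author's own statement) =====
-- stated objective: alternative
-- what changed: Replaces the single-pass sep/count state machine with early return by a declarative pipeline: collect black-pixel positions (seeded with the implicit black at index 0), take consecutive differences, and answer EVEN iff all differences are equal.
import Mathlib
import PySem

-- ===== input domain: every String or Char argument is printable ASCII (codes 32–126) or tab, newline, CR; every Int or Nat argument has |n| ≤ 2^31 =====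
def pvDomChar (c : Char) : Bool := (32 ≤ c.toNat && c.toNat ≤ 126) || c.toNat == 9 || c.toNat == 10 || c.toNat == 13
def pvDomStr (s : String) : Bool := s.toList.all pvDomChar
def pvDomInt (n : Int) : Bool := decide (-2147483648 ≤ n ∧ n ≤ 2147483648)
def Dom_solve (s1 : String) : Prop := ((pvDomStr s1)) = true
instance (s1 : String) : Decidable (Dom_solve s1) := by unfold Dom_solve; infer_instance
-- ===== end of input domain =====

-- B replaces A's sep/count state machine (early return) by positions → consecutive
-- differences → all-equal; objective: alternative decomposition (same cost).

-- ===== PORT A =====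
-- the for-loop over range(1, len(s1)) as structural recursion over the tail chars,
-- with the same (sep, count) state and the same branch order
def solveLoopA : List Char → Int → Int → String
  | [], _, _ => "EVEN"
  | c :: rest, sep, count =>
    if c == '.' then solveLoopA rest sep (count + 1)
    else if sep == -1 || count == sep then solveLoopA rest count 0
    else "NOT EVEN"

def solve (s1 : String) : String := solveLoopA (s1.toList.drop 1) (-1) 0

-- ===== PORT B =====
-- the position-collecting loop of Source B: indices i ≥ 1 with s1[i] != '.'
def blackPos : List Char → Int → List Int
  | [], _ => []
  | c :: rest, i => if c != '.' then i :: blackPos rest (i + 1) else blackPos rest (i + 1)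

def solve_alt (s1 : String) : String :=
  let pos : List Int := 0 :: blackPos (s1.toList.drop 1) 1
  let diffs : List Int := List.zipWith (fun a b => b - a) pos (pos.drop 1)
  match diffs with
  | [] => "EVEN"   -- all(...) over an empty generator: diffs[0] never evaluated
  | d0 :: _ => if diffs.all (fun d => d == d0) then "EVEN" else "NOT EVEN"

-- ===== PRECONDITION & SPEC =====
def Spec_solve (s1 : String) (out : String) : Prop := out = solve_alt s1
instance (s1 : String) (out : String) : Decidable (Spec_solve s1 out) := by unfold Spec_solve; infer_instance

-- ===== CLAIM (what is proved, stated in full; the proofs are below) =====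
def Claim_equal_solve : Prop := ∀ (s1 : String), Dom_solve s1 → Spec_solve s1 (solve s1)

-- ===== LEMMAS AND PROOFS =====

-- the lengths of runs of '.' between black pixels (trailing run dropped)
def gapsOf : List Char → Int → List Int
  | [], _ => []
  | c :: rest, cnt => if c == '.' then gapsOf rest (cnt + 1) else cnt :: gapsOf rest 0

lemma loopA_pos (l : List Char) : ∀ (sep cnt : Int), 0 ≤ sep →
    solveLoopA l sep cnt =
      (if (gapsOf l cnt).all (fun g => g == sep) then "EVEN" else "NOT EVEN") := by
  induction l with
  | nil => intro sep cnt _; simp [solveLoopA, gapsOf]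
  | cons c rest ih =>
    intro sep cnt hsep
    by_cases hc : c == '.'
    · simp only [solveLoopA, gapsOf, hc, if_pos]
      exact ih sep (cnt + 1) hsep
    · simp only [solveLoopA, gapsOf, hc, if_neg, Bool.false_eq_true, not_false_iff]
      have hne : (sep == (-1 : Int)) = false := by
        simp only [beq_eq_false_iff_ne, ne_eq]; omega
      by_cases hcs : cnt == sep
      · have hcs' : cnt = sep := by simpa [beq_iff_eq] using hcs
        rw [hne]
        simp only [Bool.false_or, hcs, if_pos]
        rw [ih cnt 0 (hcs' ▸ hsep)]
        simp [hcs', List.all_cons]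
      · rw [hne]
        simp only [Bool.false_or, hcs, Bool.false_eq_true, if_neg, not_false_iff]
        simp [List.all_cons, hcs]

lemma loopA_init (l : List Char) : ∀ (cnt : Int), 0 ≤ cnt →
    solveLoopA l (-1) cnt =
      (match gapsOf l cnt with
       | [] => "EVEN"
       | g :: rest => if rest.all (fun x => x == g) then "EVEN" else "NOT EVEN") := by
  induction l with
  | nil => intro cnt _; simp [solveLoopA, gapsOf]
  | cons c rest ih =>
    intro cnt hcnt
    by_cases hc : c == '.'
    · simp only [solveLoopA, gapsOf, hc, if_pos]
      exact ih (cnt + 1) (by omega)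
    · simp only [solveLoopA, gapsOf, hc, if_neg, Bool.false_eq_true, not_false_iff]
      simp only [show ((-1 : Int) == (-1 : Int)) = true by decide, Bool.true_or, if_pos]
      exact loopA_pos rest cnt 0 hcnt

-- consecutive differences of the position list are the gaps, each plus one
lemma diffs_eq_gaps (l : List Char) : ∀ (p c : Int),
    List.zipWith (fun a b => b - a) (p :: blackPos l (p + c + 1))
        ((p :: blackPos l (p + c + 1)).drop 1)
      = (gapsOf l c).map (· + 1) := by
  induction l with
  | nil => intro p c; simp [blackPos, gapsOf]
  | cons ch rest ih =>
    intro p c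
    by_cases hc : ch == '.'
    · have hb : (ch != '.') = false := by simpa [bne] using hc
      simp only [blackPos, gapsOf, hb, hc, if_pos, Bool.false_eq_true, if_neg,
        not_false_iff]
      have : p + c + 1 + 1 = p + (c + 1) + 1 := by ring
      rw [this]
      exact ih p (c + 1)
    · have hb : (ch != '.') = true := by simpa [bne] using hc
      simp only [blackPos, gapsOf, hb, hc, if_pos, Bool.false_eq_true, if_neg,
        not_false_iff]
      have h2 : p + c + 1 + 1 = (p + c + 1) + 0 + 1 := by ring
      rw [h2]
      have := ih (p + c + 1) 0
      simp only [List.drop, List.zipWith] at this ⊢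
      rw [this]
      have : p + c + 1 - p = c + 1 := by ring
      rw [this]
      simp

lemma all_shift (rest : List Int) (g : Int) :
    rest.all (fun x => x + 1 == g + 1) = rest.all (fun x => x == g) := by
  induction rest with
  | nil => rfl
  | cons a t ih =>
    simp only [List.all_cons, ih]
    have : (a + 1 == g + 1) = (a == g) := by
      by_cases h : a = g
      · simp [h]
      · have h1 : (a + 1 == g + 1) = false := by
          simp only [beq_eq_false_iff_ne, ne_eq]; omega
        have h2 : (a == g) = false := by
          simp only [beq_eq_false_iff_ne, ne_eq]; exact h
        rw [h1, h2]
    rw [this]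

lemma solve_eq (s1 : String) : solve s1 = solve_alt s1 := by
  have key : List.zipWith (fun a b => b - a) (0 :: blackPos (s1.toList.drop 1) 1)
      ((0 :: blackPos (s1.toList.drop 1) 1).drop 1)
      = (gapsOf (s1.toList.drop 1) 0).map (· + 1) := by
    have h := diffs_eq_gaps (s1.toList.drop 1) 0 0
    simpa using h
  unfold solve solve_alt
  show solveLoopA (s1.toList.drop 1) (-1) 0 =
    (match List.zipWith (fun a b => b - a) (0 :: blackPos (s1.toList.drop 1) 1)
        ((0 :: blackPos (s1.toList.drop 1) 1).drop 1) with
     | [] => "EVEN"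
     | d0 :: _ =>
       if (List.zipWith (fun a b => b - a) (0 :: blackPos (s1.toList.drop 1) 1)
            ((0 :: blackPos (s1.toList.drop 1) 1).drop 1)).all (fun d => d == d0)
       then "EVEN" else "NOT EVEN")
  rw [key]
  rw [loopA_init (s1.toList.drop 1) 0 (by omega)]
  cases gapsOf (s1.toList.drop 1) 0 with
  | nil => rfl
  | cons g rest =>
    simp only [List.map_cons, List.all_cons, beq_self_eq_true, Bool.true_and]
    rw [List.all_map]
    have : rest.all ((fun d => d == g + 1) ∘ (· + 1)) = rest.all (fun x => x == g) := by
      rw [← all_shift rest g]; rfl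
    rw [this]

-- ===== VERDICT (by name: the statement is the Claim_ definition above) =====
theorem solve_spec : Claim_equal_solve := by
  intro s1 _
  unfold Spec_solve
  exact solve_eq s1
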